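-- pv_equiv track=rewrite | github.com/leffj/helper-code-for-uparse | test_prep_fastq_for_uparse.py | basic_fastq_parser
-- ===== SOURCE A (Python) =====
-- def basic_fastq_parser(in_f):
-- 	lineno, head, seq, qual = 0, "", "", ""
-- 	for l in in_f:
-- 		lineno += 1
-- 		if lineno%4 == 1: head = l.strip()
-- 		elif lineno%4 == 2: seq = l.strip()
-- 		elif lineno%4 == 0:
-- 			qual = l.strip()
-- 			yield head, seq, qual
-- ===== SOURCE B (Python) =====
-- def basic_fastq_parser(in_f):
--     lines = list(in_f)
--     nrec = len(lines) // 4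
--     for r in range(nrec):
--         yield (lines[4 * r].strip(), lines[4 * r + 1].strip(), lines[4 * r + 3].strip())
-- ===== Notes on version B (the rewrite author's own statement) =====
-- stated objective: alternative
-- what changed: Replaces A's streaming line counter with modulo branch dispatch by a random-access formulation: materialize the lines, compute the number of complete records as len//4 in closed form, and index head/seq/qual of each record directly by arithmetic on the record number.
import Mathlib
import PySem

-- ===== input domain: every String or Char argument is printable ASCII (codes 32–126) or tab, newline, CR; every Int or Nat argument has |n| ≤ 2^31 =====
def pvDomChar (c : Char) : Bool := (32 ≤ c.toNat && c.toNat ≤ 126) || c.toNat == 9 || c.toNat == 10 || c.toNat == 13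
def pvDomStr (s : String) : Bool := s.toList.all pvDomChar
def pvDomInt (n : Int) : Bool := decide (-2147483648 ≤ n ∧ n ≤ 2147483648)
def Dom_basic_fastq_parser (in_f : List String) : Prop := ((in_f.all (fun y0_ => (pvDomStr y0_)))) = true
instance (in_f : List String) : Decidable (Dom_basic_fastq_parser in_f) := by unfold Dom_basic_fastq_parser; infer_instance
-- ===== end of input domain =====

-- B replaces A's streaming line counter with modulo dispatch by a random-access formulation:
-- the number of complete records is len//4 and each record's lines are indexed directly (alternative).


-- ===== PORT A =====
-- one loop iteration of A: bump lineno, dispatch on lineno % 4, append a record on the 4th line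
def basic_fastq_parser_step :
    Int × String × String × String × List (String × String × String) → String →
    Int × String × String × String × List (String × String × String)
  | (lineno, head, seq, qual, out), l =>
    let lineno := lineno + 1
    if PySem.Int.mod lineno 4 = 1 then (lineno, PySem.Str.strip l, seq, qual, out)
    else if PySem.Int.mod lineno 4 = 2 then (lineno, head, PySem.Str.strip l, qual, out)
    else if PySem.Int.mod lineno 4 = 0 then
      let qual := PySem.Str.strip l
      (lineno, head, seq, qual, out ++ [(head, seq, qual)])
    else (lineno, head, seq, qual, out)

def basic_fastq_parser (in_f : List String) : List (String × String × String) :=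
  (in_f.foldl basic_fastq_parser_step (0, "", "", "", [])).2.2.2.2

-- ===== PORT B =====
-- nrec = len(lines) // 4 records; record r is built from lines 4r, 4r+1 and 4r+3 by direct indexing
def basic_fastq_parser_alt (in_f : List String) : List (String × String × String) :=
  let lines := in_f
  let nrec := PySem.Int.floordiv (PySem.List.len lines) 4
  (PySem.List.pyRange 0 nrec 1).map (fun r =>
    (PySem.Str.strip (PySem.List.pyGetD lines (4 * r) ""),
     PySem.Str.strip (PySem.List.pyGetD lines (4 * r + 1) ""),
     PySem.Str.strip (PySem.List.pyGetD lines (4 * r + 3) "")))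

-- ===== PRECONDITION & SPEC =====
def Spec_basic_fastq_parser (in_f : List String) (out : List (String × String × String)) : Prop := out = basic_fastq_parser_alt in_f
instance (in_f : List String) (out : List (String × String × String)) : Decidable (Spec_basic_fastq_parser in_f out) := by unfold Spec_basic_fastq_parser; infer_instance

-- ===== CLAIM (what is proved, stated in full; the proofs are below) =====
def Claim_equal_basic_fastq_parser : Prop := ∀ (in_f : List String), Dom_basic_fastq_parser in_f → Spec_basic_fastq_parser in_f (basic_fastq_parser in_f)

-- ===== LEMMAS AND PROOFS =====

-- proof-side intermediate form: group the input into chunks of four lines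
def pvChunk4 : List String → List (String × String × String)
  | head :: seq :: _plus :: qual :: rest =>
      (PySem.Str.strip head, PySem.Str.strip seq, PySem.Str.strip qual) :: pvChunk4 rest
  | _ => []

lemma mod4_1 (k : Int) : PySem.Int.mod (4*k+1) 4 = 1 := by
  rw [PySem.Int.mod_eq_emod_of_pos (by norm_num)]; omega

lemma mod4_2 (k : Int) : PySem.Int.mod (4*k+2) 4 = 2 := by
  rw [PySem.Int.mod_eq_emod_of_pos (by norm_num)]; omega

lemma mod4_3 (k : Int) : PySem.Int.mod (4*k+3) 4 = 3 := by
  rw [PySem.Int.mod_eq_emod_of_pos (by norm_num)]; omega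

lemma mod4_0 (k : Int) : PySem.Int.mod (4*k+4) 4 = 0 := by
  rw [PySem.Int.mod_eq_emod_of_pos (by norm_num)]; omega

lemma step1 (k : Int) (h s q : String) (out : List (String × String × String)) (l : String) :
    basic_fastq_parser_step (4*k, h, s, q, out) l = (4*k+1, PySem.Str.strip l, s, q, out) := by
  simp only [basic_fastq_parser_step]
  rw [mod4_1]
  norm_num

lemma step2 (k : Int) (h s q : String) (out : List (String × String × String)) (l : String) :
    basic_fastq_parser_step (4*k+1, h, s, q, out) l = (4*k+2, h, PySem.Str.strip l, q, out) := by
  simp only [basic_fastq_parser_step]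
  rw [show (4*k:Int)+1+1 = 4*k+2 by ring, mod4_2]
  norm_num

lemma step3 (k : Int) (h s q : String) (out : List (String × String × String)) (l : String) :
    basic_fastq_parser_step (4*k+2, h, s, q, out) l = (4*k+3, h, s, q, out) := by
  simp only [basic_fastq_parser_step]
  rw [show (4*k:Int)+2+1 = 4*k+3 by ring, mod4_3]
  norm_num

lemma step4 (k : Int) (h s q : String) (out : List (String × String × String)) (l : String) :
    basic_fastq_parser_step (4*k+3, h, s, q, out) l
      = (4*(k+1), h, s, PySem.Str.strip l, out ++ [(h, s, PySem.Str.strip l)]) := by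
  simp only [basic_fastq_parser_step]
  rw [show (4*k:Int)+3+1 = 4*k+4 by ring, mod4_0]
  norm_num
  ring

-- A's fold accumulates exactly the chunked records
theorem fold_go : ∀ (l : List String) (k : Int) (h s q : String)
    (out : List (String × String × String)),
    (l.foldl basic_fastq_parser_step (4*k, h, s, q, out)).2.2.2.2
      = out ++ pvChunk4 l
  | [], k, h, s, q, out => by simp [pvChunk4]
  | [a], k, h, s, q, out => by
      rw [List.foldl_cons, step1, List.foldl_nil]
      simp [pvChunk4]
  | [a, b], k, h, s, q, out => by
      rw [List.foldl_cons, step1, List.foldl_cons, step2, List.foldl_nil]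
      simp [pvChunk4]
  | [a, b, c], k, h, s, q, out => by
      rw [List.foldl_cons, step1, List.foldl_cons, step2, List.foldl_cons, step3, List.foldl_nil]
      simp [pvChunk4]
  | a :: b :: c :: d :: rest, k, h, s, q, out => by
      rw [List.foldl_cons, step1, List.foldl_cons, step2, List.foldl_cons, step3,
          List.foldl_cons, step4, fold_go rest (k+1)]
      simp [pvChunk4]

-- B in Nat-index form
lemma alt_nat_form (l : List String) :
    basic_fastq_parser_alt l
      = (List.range (l.length / 4)).map (fun k =>
          (PySem.Str.strip (l.getD (4*k) ""),
           PySem.Str.strip (l.getD (4*k+1) ""),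
           PySem.Str.strip (l.getD (4*k+3) ""))) := by
  simp only [basic_fastq_parser_alt, PySem.List.len_eq]
  rw [show ((l.length : Int)) = ((l.length : Nat) : Int) from rfl,
      show (4 : Int) = ((4 : Nat) : Int) from rfl,
      PySem.Int.floordiv_natCast, PySem.List.pyRange_one]
  simp only [List.map_map]
  apply List.map_congr_left
  intro k _
  simp only [Function.comp, zero_add]
  rw [show (((4:Nat):Int) * (k : Int)) = ((4*k : Nat) : Int) by push_cast; ring,
      show ((4*k : Nat) : Int) + 1 = ((4*k+1 : Nat) : Int) by push_cast; ring,
      show ((4*k : Nat) : Int) + 3 = ((4*k+3 : Nat) : Int) by push_cast; ring]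
  simp only [PySem.List.pyGetD_natCast]

-- the Nat-index map equals the chunked form
theorem nat_chunk : ∀ (l : List String),
    (List.range (l.length / 4)).map (fun k =>
        (PySem.Str.strip (l.getD (4*k) ""),
         PySem.Str.strip (l.getD (4*k+1) ""),
         PySem.Str.strip (l.getD (4*k+3) ""))) = pvChunk4 l
  | [] => by simp [pvChunk4]
  | [a] => by simp [pvChunk4]
  | [a, b] => by simp [pvChunk4]
  | [a, b, c] => by simp [pvChunk4]
  | a :: b :: c :: d :: rest => by
      have hlen : (a :: b :: c :: d :: rest).length / 4 = rest.length / 4 + 1 := by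
        simp [List.length]; omega
      rw [hlen, List.range_succ_eq_map, List.map_cons, List.map_map]
      simp only [pvChunk4]
      refine congrArg₂ List.cons ?_ ?_
      · simp [List.getD]
      · rw [← nat_chunk rest]
        apply List.map_congr_left
        intro k _
        simp only [Function.comp, Nat.succ_eq_add_one]
        rw [show 4 * (k + 1) = (((4*k+1)+1)+1)+1 by ring,
            show (((4*k+1)+1)+1)+1 + 1 = ((((4*k+1+1)+1)+1))+1 by ring,
            show (((4*k+1)+1)+1)+1 + 3 = ((((4*k+3)+1)+1)+1)+1 by ring]
        simp

-- ===== VERDICT (by name: the statement is the Claim_ definition above) =====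
theorem basic_fastq_parser_spec : Claim_equal_basic_fastq_parser := by
  intro in_f _
  show basic_fastq_parser in_f = basic_fastq_parser_alt in_f
  rw [alt_nat_form, nat_chunk]
  have := fold_go in_f 0 "" "" "" []
  simpa [basic_fastq_parser] using this
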